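-- pv_equiv track=rewrite | github.com/BryanCW0303/Leetcode | Greedy/3723. Maximize Sum of Squares of Digits.py | maxSumOfSquares
-- ===== SOURCE A (Python) =====
-- def maxSumOfSquares(n: int, s: int) -> str:
--     if n * 9 < s:
--         return ''
--     ans = []
--     while s > 0:
--         digit = min(9, s)
--         ans.append(str(digit))
--         s -= digit
--         n -= 1
--     if n > 0:
--         ans += ['0'] * n
--     return "".join(ans)
-- ===== SOURCE B (Python) =====
-- def maxSumOfSquares(n: int, s: int) -> str:
--     if n * 9 < s:
--         return ''
--     s = max(s, 0)
--     nines, rem = divmod(s, 9)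
--     pad = n - nines - (1 if rem else 0)
--     return '9' * nines + (str(rem) if rem else '') + '0' * pad
-- ===== Notes on version B (the rewrite author's own statement) =====
-- stated objective: simpler
-- what changed: Replaces A's per-digit greedy while-loop and list-join with a closed-form divmod(s,9) computation that builds the string by repetition in one expression.
import Mathlib
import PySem

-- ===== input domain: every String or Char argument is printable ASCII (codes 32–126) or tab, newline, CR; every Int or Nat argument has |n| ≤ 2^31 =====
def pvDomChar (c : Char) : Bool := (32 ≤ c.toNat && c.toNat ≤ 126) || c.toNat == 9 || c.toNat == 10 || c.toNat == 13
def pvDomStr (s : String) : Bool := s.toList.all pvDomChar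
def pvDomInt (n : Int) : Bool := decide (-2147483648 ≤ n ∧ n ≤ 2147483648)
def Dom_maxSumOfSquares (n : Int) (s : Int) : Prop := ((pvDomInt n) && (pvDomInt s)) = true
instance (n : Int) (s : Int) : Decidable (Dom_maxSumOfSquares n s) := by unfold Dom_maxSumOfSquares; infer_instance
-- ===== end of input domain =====

-- B replaces A's per-digit greedy while-loop with a closed-form divmod(s,9) construction (objective: simpler).

-- ===== PORT A =====
-- A's while-loop: state (s, n, ans); returns (ans, n) when s ≤ 0
def pvLoopA (s n : Int) (ans : List String) : List String × Int :=
  if 0 < s then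
    pvLoopA (s - min 9 s) (n - 1) (ans ++ [PySem.Int.toStr (min 9 s)])
  else (ans, n)
termination_by s.toNat
decreasing_by omega

def maxSumOfSquares (n : Int) (s : Int) : String :=
  if n * 9 < s then "" else
    let p := pvLoopA s n []
    let ans := if 0 < p.2 then p.1 ++ List.replicate p.2.toNat "0" else p.1
    PySem.Str.join "" ans

-- ===== PORT B =====
def maxSumOfSquares_alt (n : Int) (s : Int) : String :=
  if n * 9 < s then "" else
    let s' := max s 0
    let nines := PySem.Int.floordiv s' 9
    let rem := PySem.Int.mod s' 9
    let pad := n - nines - (if rem ≠ 0 then 1 else 0)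
    String.ofList (List.replicate nines.toNat '9') ++
      (if rem ≠ 0 then PySem.Int.toStr rem else "") ++
      String.ofList (List.replicate pad.toNat '0')

-- ===== PRECONDITION & SPEC =====
def Spec_maxSumOfSquares (n : Int) (s : Int) (out : String) : Prop := out = maxSumOfSquares_alt n s
instance (n : Int) (s : Int) (out : String) : Decidable (Spec_maxSumOfSquares n s out) := by unfold Spec_maxSumOfSquares; infer_instance

-- ===== CLAIM (what is proved, stated in full; the proofs are below) =====
def Claim_equal_maxSumOfSquares : Prop := ∀ (n : Int) (s : Int), Dom_maxSumOfSquares n s → Spec_maxSumOfSquares n s (maxSumOfSquares n s)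

-- ===== LEMMAS AND PROOFS =====

-- characterisation of A's loop: it emits ⌊s/9⌋ nines and one trailing digit s % 9 (if nonzero)
theorem pvLoopA_spec : ∀ (k : Nat) (s n : Int) (ans : List String), s.toNat = k →
    pvLoopA s n ans =
      (ans ++ (if 0 < s then
          List.replicate (PySem.Int.floordiv s 9).toNat (PySem.Int.toStr 9) ++
            (if PySem.Int.mod s 9 ≠ 0 then [PySem.Int.toStr (PySem.Int.mod s 9)] else [])
        else []),
       n - (if 0 < s then (PySem.Int.floordiv s 9) + (if PySem.Int.mod s 9 ≠ 0 then 1 else 0) else 0)) := by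
  intro k
  induction k using Nat.strong_induction_on with
  | _ k ih =>
    intro s n ans hk
    rw [pvLoopA]
    by_cases hs : 0 < s
    · rw [PySem.Int.floordiv_eq_ediv_of_pos (by omega), PySem.Int.mod_eq_emod_of_pos (by omega)]
      simp only [hs, if_pos]
      by_cases h9 : 9 ≤ s
      · have hmin : min 9 s = 9 := by omega
        rw [hmin, ih (s - 9).toNat (by omega) (s - 9) (n - 1) _ rfl]
        by_cases hs9 : 0 < s - 9
        · rw [PySem.Int.floordiv_eq_ediv_of_pos (by omega), PySem.Int.mod_eq_emod_of_pos (by omega)]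
          simp only [hs9, if_pos]
          have hq : s / 9 = (s - 9) / 9 + 1 := by omega
          have hm : s % 9 = (s - 9) % 9 := by omega
          have hqn : (s / 9).toNat = ((s - 9) / 9).toNat + 1 := by omega
          rw [hm, hqn, List.replicate_succ]
          simp only [Prod.mk.injEq]
          refine ⟨by simp, by omega⟩
        · have hs9' : s = 9 := by omega
          subst hs9'
          norm_num
      · have hmin : min 9 s = s := by omega
        rw [hmin, ih (s - s).toNat (by omega) (s - s) (n - 1) _ rfl]
        have hss : ¬ (0 < s - s) := by omega
        simp only [sub_self]
        have hq : s / 9 = 0 := by omega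
        have hm : s % 9 = s := by omega
        rw [hq, hm]
        have hs0 : s ≠ 0 := by omega
        simp only [Prod.mk.injEq]
        exact ⟨by simp [hs0], by simp [hs0]⟩
    · simp [hs]

-- joining with the empty separator is flatten
theorem chars_join_nil_flatten : ∀ (parts : List (List Char)), PySem.Chars.join [] parts = parts.flatten
  | [] => PySem.Chars.join_nil []
  | [a] => by rw [PySem.Chars.join_singleton]; simp
  | a :: b :: l => by
      rw [PySem.Chars.join_cons_cons, chars_join_nil_flatten (b :: l)]; simp

-- "".join of a list of strings, as a flatten on toList
theorem join_empty_toList (parts : List String) :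
    (PySem.Str.join "" parts).toList = (parts.map String.toList).flatten := by
  rw [PySem.Str.toList_join]
  have h : ("" : String).toList = [] := rfl
  rw [h, chars_join_nil_flatten]

-- ===== VERDICT (by name: the statement is the Claim_ definition above) =====
theorem maxSumOfSquares_spec : Claim_equal_maxSumOfSquares := by
  intro n s _hdom
  unfold Spec_maxSumOfSquares maxSumOfSquares maxSumOfSquares_alt
  by_cases hg : n * 9 < s
  · simp [hg]
  · rw [if_neg hg, if_neg hg]
    rw [pvLoopA_spec s.toNat s n [] rfl]
    by_cases hs : 0 < s
    · have hmax : max s 0 = s := by omega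
      rw [hmax]
      rw [PySem.Int.floordiv_eq_ediv_of_pos (by omega), PySem.Int.mod_eq_emod_of_pos (by omega)]
      simp only [hs, if_pos, List.nil_append]
      apply String.ext
      rw [join_empty_toList]
      rw [PySem.Int.floordiv_eq_ediv_of_pos (by norm_num), PySem.Int.mod_eq_emod_of_pos (by norm_num)]
      have h9 : PySem.Int.toStr 9 = "9" := by decide
      rw [h9]
      split_ifs with hm hp hp
      · simp [String.toList_ofList]
        omega
      · simp [String.toList_ofList]
        omega
      · simp [String.toList_ofList]
      · simp [String.toList_ofList]
        omega
    · have hmax : max s 0 = 0 := by omega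
      rw [hmax]
      simp only [hs, if_false]
      have hd : PySem.Int.floordiv 0 9 = 0 := by decide
      have hm0 : PySem.Int.mod 0 9 = 0 := by decide
      rw [hd, hm0]
      apply String.ext
      rw [join_empty_toList]
      by_cases hn : 0 < n
      · simp [hn, String.toList_ofList]
      · simp [hn, String.toList_ofList]
        omega
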